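-- pv_equiv track=rewrite | github.com/AdityaJyoti2002/Pythoncode | code/E. Iva & Pav.py | minimum_m_values
-- ===== SOURCE A (Python) =====
-- def minimum_m_values(test_cases):
--     results = []
--     for n, a in test_cases:
--         m = 0
--         elements_set = set(a)
--         current_mex = 0
--
--         for _ in range(n):
--             while current_mex in elements_set:
--                 current_mex += 1
--             m += current_mex
--             elements_set.add(current_mex)
--
--         results.append(m)
--
--     return results
-- ===== SOURCE B (Python) =====
-- def minimum_m_values(test_cases):
--     results = []
--     for n, a in test_cases:
--         vals = sorted({x for x in a if x >= 0})
--         rem = n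
--         total = 0
--         cur = 0
--         for v in vals:
--             if rem <= 0:
--                 break
--             gap = v - cur
--             if gap > 0:
--                 take = min(rem, gap)
--                 total += take * cur + take * (take - 1) // 2
--                 rem -= take
--             cur = v + 1
--         if rem > 0:
--             total += rem * cur + rem * (rem - 1) // 2
--         results.append(total)
--     return results
-- ===== Notes on version B (the rewrite author's own statement) =====
-- stated objective: alternative
-- what changed: Replaces the per-case mex simulation (a growing hash set plus a counter incremented once per returned integer) by sorting the distinct nonnegative elements and summing the first n missing integers gap by gap with arithmetic-series formulas, without ever materialising or mutating a set of seen values.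
import Mathlib
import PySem

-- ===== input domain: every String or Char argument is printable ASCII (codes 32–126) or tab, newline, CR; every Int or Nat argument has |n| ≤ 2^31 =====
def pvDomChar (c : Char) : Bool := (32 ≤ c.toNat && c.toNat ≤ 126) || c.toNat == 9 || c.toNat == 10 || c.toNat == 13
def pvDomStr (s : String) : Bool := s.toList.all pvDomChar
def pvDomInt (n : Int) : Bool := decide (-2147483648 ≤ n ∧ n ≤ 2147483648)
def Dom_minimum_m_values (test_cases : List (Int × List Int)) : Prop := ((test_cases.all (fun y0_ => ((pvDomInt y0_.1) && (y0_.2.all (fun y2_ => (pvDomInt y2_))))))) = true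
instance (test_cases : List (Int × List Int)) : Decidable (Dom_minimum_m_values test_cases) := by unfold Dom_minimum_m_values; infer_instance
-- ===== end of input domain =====

-- B replaces A's one-at-a-time mex simulation over a growing set by sorting the distinct
-- nonnegative elements and summing the first n missing integers gap by gap with arithmetic-series
-- formulas; equivalence of return values is proved for all inputs.

-- ===== PORT A =====
-- 'while current_mex in elements_set: current_mex += 1', ported with fuel over the set's
-- membership test; fuel = |set| + 1 always suffices (pvSeek_spec below).
def pvSeek (memb : Int → Bool) : Nat → Int → Int
  | 0, c => c
  | fuel+1, c => if memb c then pvSeek memb fuel (c+1) else c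

-- one iteration of A's 'for _ in range(n)' body over the state (m, elements_set, current_mex);
-- Python's hash set is ported as Std.HashSet Int (identical membership/insert semantics; A's
-- result never consumes the set's iteration order)
def pvStepA (st : Int × Std.HashSet Int × Int) : Int × Std.HashSet Int × Int :=
  let c' := pvSeek (fun x => st.2.1.contains x) (st.2.1.size + 1) st.2.2
  (st.1 + c', st.2.1.insert c', c')

-- one test case of A
def pvCaseA (n : Int) (a : List Int) : Int :=
  ((PySem.List.pyRange 0 n 1).foldl (fun st _ => pvStepA st) (0, Std.HashSet.ofList a, 0)).1

def minimum_m_values (test_cases : List (Int × List Int)) : List Int :=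
  test_cases.foldl (fun results p => results ++ [pvCaseA p.1 p.2]) []

-- ===== PORT B =====
-- B's 'for v in vals' loop with break, state (rem, total, cur)
def pvGapsB : List Int → Int → Int → Int → Int × Int × Int
  | [], rem, total, cur => (rem, total, cur)
  | v :: vs, rem, total, cur =>
    if rem ≤ 0 then (rem, total, cur)
    else
      let gap := v - cur
      if gap > 0 then
        let take := min rem gap
        pvGapsB vs (rem - take)
          (total + take * cur + PySem.Int.floordiv (take * (take - 1)) 2) (v + 1)
      else pvGapsB vs rem total (v + 1)

-- B's final 'if rem > 0: total += rem * cur + rem * (rem - 1) // 2'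
def pvFinishB (r : Int × Int × Int) : Int :=
  if r.1 > 0 then r.2.1 + r.1 * r.2.2 + PySem.Int.floordiv (r.1 * (r.1 - 1)) 2 else r.2.1

-- one test case of B
def pvCaseB (n : Int) (a : List Int) : Int :=
  let vals := PySem.List.sorted (PySem.Set.ofList (a.filter (fun x => decide (0 ≤ x)))) (fun x => x) false
  pvFinishB (pvGapsB vals n 0 0)

def minimum_m_values_alt (test_cases : List (Int × List Int)) : List Int :=
  test_cases.foldl (fun results p => results ++ [pvCaseB p.1 p.2]) []

-- ===== PRECONDITION & SPEC =====
def Spec_minimum_m_values (test_cases : List (Int × List Int)) (out : List Int) : Prop := out = minimum_m_values_alt test_cases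
instance (test_cases : List (Int × List Int)) (out : List Int) : Decidable (Spec_minimum_m_values test_cases out) := by unfold Spec_minimum_m_values; infer_instance

-- ===== CLAIM (what is proved, stated in full; the proofs are below) =====
def Claim_equal_minimum_m_values : Prop := ∀ (test_cases : List (Int × List Int)), Dom_minimum_m_values test_cases → Spec_minimum_m_values test_cases (minimum_m_values test_cases)

-- ===== LEMMAS AND PROOFS =====

-- counting elements ≥ c splits into those ≥ c+1 and those equal to c
lemma pvCountP_split (l : List Int) (c : Int) :
    l.countP (fun x => decide (c + 1 ≤ x)) + l.count c = l.countP (fun x => decide (c ≤ x)) := by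
  induction l with
  | nil => simp
  | cons x t ih =>
    simp only [List.countP_cons, List.count_cons, beq_iff_eq, decide_eq_true_eq]
    split_ifs <;> omega

-- the while loop with enough fuel finds the least y ≥ c outside the (finitely supported) membership test
lemma pvSeek_spec (memb : Int → Bool) (l : List Int)
    (hml : ∀ y : Int, memb y = true ↔ y ∈ l) :
    ∀ (fuel : Nat) (c : Int),
    l.countP (fun x => decide (c ≤ x)) < fuel →
    c ≤ pvSeek memb fuel c ∧ memb (pvSeek memb fuel c) = false ∧
      (∀ y, c ≤ y → y < pvSeek memb fuel c → memb y = true) := by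
  intro fuel
  induction fuel with
  | zero => intro c h; omega
  | succ f ih =>
    intro c h
    by_cases hc : memb c = true
    · have hr : pvSeek memb (f + 1) c = pvSeek memb f (c + 1) := by
        simp [pvSeek, hc]
      have hcount : l.countP (fun x => decide (c + 1 ≤ x)) < f := by
        have h1 := pvCountP_split l c
        have h2 : 1 ≤ l.count c := List.one_le_count_iff.mpr ((hml c).mp hc)
        omega
      obtain ⟨h1, h2, h3⟩ := ih (c + 1) hcount
      rw [hr]
      refine ⟨by omega, h2, ?_⟩
      intro y hy1 hy2
      rcases eq_or_lt_of_le hy1 with h | h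
      · subst h; exact hc
      · exact h3 y (by omega) hy2
    · have hc' : memb c = false := by simpa using hc
      have hr : pvSeek memb (f + 1) c = c := by simp [pvSeek, hc']
      rw [hr]
      exact ⟨le_refl c, hc', fun y hy1 hy2 => by omega⟩

-- least elements of a predicate above c are unique
lemma pvLeast_unique (P : Int → Prop) (c r r' : Int)
    (h1 : c ≤ r) (h2 : P r) (h3 : ∀ y, c ≤ y → y < r → ¬ P y)
    (h1' : c ≤ r') (h2' : P r') (h3' : ∀ y, c ≤ y → y < r' → ¬ P y) : r = r' := by
  rcases lt_trichotomy r r' with h | h | h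
  · exact absurd h2 (h3' r h1 h)
  · exact h
  · exact absurd h2' (h3 r' h1' h)

-- 'next free': the least y ≥ c not in a
def pvNf (a : List Int) (c : Int) : Int := pvSeek (fun x => decide (x ∈ a)) (a.length + 1) c

lemma pvNf_spec (a : List Int) (c : Int) :
    c ≤ pvNf a c ∧ pvNf a c ∉ a ∧ (∀ y, c ≤ y → y < pvNf a c → y ∈ a) := by
  obtain ⟨h1, h2, h3⟩ := pvSeek_spec (fun x => decide (x ∈ a)) a (fun y => by simp)
    (a.length + 1) c
    (by have := List.countP_le_length (p := fun x => decide (c ≤ x)) (l := a); omega)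
  exact ⟨h1, by simpa using h2, fun y hy1 hy2 => by simpa using h3 y hy1 hy2⟩

lemma pvNf_of_not_mem (a : List Int) (c : Int) (h : c ∉ a) : pvNf a c = c := by
  obtain ⟨h1, h2, h3⟩ := pvNf_spec a c
  exact pvLeast_unique (fun y => y ∉ a) c _ c h1 h2 (fun y hy1 hy2 => not_not_intro (h3 y hy1 hy2))
    (le_refl c) h (fun y hy1 hy2 => by omega)

lemma pvNf_of_mem (a : List Int) (c : Int) (h : c ∈ a) : pvNf a c = pvNf a (c + 1) := by
  obtain ⟨h1, h2, h3⟩ := pvNf_spec a c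
  obtain ⟨h1', h2', h3'⟩ := pvNf_spec a (c + 1)
  refine pvLeast_unique (fun y => y ∉ a) c _ _ h1 h2
    (fun y hy1 hy2 => not_not_intro (h3 y hy1 hy2)) (by omega) h2' ?_
  intro y hy1 hy2
  rcases eq_or_lt_of_le hy1 with hy | hy
  · subst hy; exact not_not_intro h
  · exact not_not_intro (h3' y (by omega) hy2)

-- sum of the first k integers ≥ c missing from a
def pvSpecSum (a : List Int) : Nat → Int → Int
  | 0, _ => 0
  | k+1, c => pvNf a c + pvSpecSum a k (pvNf a c + 1)

lemma pvSpecSum_mem_step (a : List Int) (k : Nat) (c : Int) (h : c ∈ a) :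
    pvSpecSum a k c = pvSpecSum a k (c + 1) := by
  cases k with
  | zero => rfl
  | succ k => simp [pvSpecSum, pvNf_of_mem a c h]

def pvTri : Nat → Int
  | 0 => 0
  | t+1 => pvTri t + t

lemma pvSpecSum_run (a : List Int) : ∀ (t k : Nat) (c : Int), t ≤ k →
    (∀ y, c ≤ y → y < c + t → y ∉ a) →
    pvSpecSum a k c = t * c + pvTri t + pvSpecSum a (k - t) (c + t) := by
  intro t
  induction t with
  | zero => intro k c _ _; simp [pvTri]
  | succ t ih =>
    intro k c htk hfree
    obtain ⟨k', rfl⟩ : ∃ k', k = k' + 1 := ⟨k - 1, by omega⟩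
    have hc : c ∉ a := hfree c (le_refl c) (by push_cast; omega)
    have hstep : pvSpecSum a (k' + 1) c = c + pvSpecSum a k' (c + 1) := by
      simp [pvSpecSum, pvNf_of_not_mem a c hc]
    rw [hstep, ih k' (c + 1) (by omega) (fun y hy1 hy2 => hfree y (by omega) (by push_cast at hy2 ⊢; omega))]
    have htri : pvTri (t + 1) = pvTri t + (t : Int) := rfl
    have hk : k' + 1 - (t + 1) = k' - t := by omega
    rw [hk, htri]
    push_cast
    have harg : c + ((t : Int) + 1) = c + 1 + (t : Int) := by ring
    rw [harg]
    ring

lemma pvFd_tri (x : Int) (hx : 0 ≤ x) :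
    PySem.Int.floordiv (x * (x - 1)) 2 = pvTri x.toNat := by
  obtain ⟨t, rfl⟩ : ∃ t : Nat, x = (t : Int) := ⟨x.toNat, (Int.toNat_of_nonneg hx).symm⟩
  rw [PySem.Int.floordiv_eq_ediv_of_pos (by norm_num)]
  simp only [Int.toNat_natCast]
  induction t with
  | zero => simp [pvTri]
  | succ t ih =>
    have harith : ((t : Int) + 1) * ((t : Int) + 1 - 1) = (t : Int) * ((t : Int) - 1) + 2 * (t : Int) := by ring
    push_cast
    rw [harith, Int.add_mul_ediv_left _ _ (by norm_num)]
    have ihh := ih (by positivity)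
    push_cast at ihh
    rw [ihh]
    simp [pvTri]

-- ---- A side ----

def pvIterA : Nat → (Int × Std.HashSet Int × Int) → (Int × Std.HashSet Int × Int)
  | 0, st => st
  | k+1, st => pvIterA k (pvStepA st)

lemma pvFoldl_stepA (l : List Int) (st : Int × Std.HashSet Int × Int) :
    l.foldl (fun st _ => pvStepA st) st = pvIterA l.length st := by
  induction l generalizing st with
  | nil => rfl
  | cons x t ih => simp [pvIterA, ih]

lemma pvIterA_spec (a : List Int) : ∀ (k : Nat) (m : Int) (s : Std.HashSet Int) (c b : Int),
    0 ≤ c → c ≤ b →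
    (∀ x : Int, x ∈ s ↔ (x ∈ a ∨ (0 ≤ x ∧ x < b))) →
    (pvIterA k (m, s, c)).1 = m + pvSpecSum a k b := by
  intro k
  induction k with
  | zero => intro m s c b _ _ _; simp [pvIterA, pvSpecSum]
  | succ k ih =>
    intro m s c b hc hcb hmem
    obtain ⟨hw1, hw2, hw3⟩ := pvSeek_spec (fun x => s.contains x) s.toList
      (fun y => by simp [Std.HashSet.contains_iff_mem, Std.HashSet.mem_toList])
      (s.size + 1) c
      (by have h1 := List.countP_le_length (l := s.toList) (p := fun x => decide (c ≤ x))
          have h2 := Std.HashSet.length_toList (m := s)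
          omega)
    obtain ⟨hn1, hn2, hn3⟩ := pvNf_spec a b
    set c' := pvSeek (fun x => s.contains x) (s.size + 1) c with hc'
    have hw2' : c' ∉ s := by
      intro hin
      have hco : s.contains c' = true := Std.HashSet.contains_iff_mem.mpr hin
      rw [hw2] at hco
      cases hco
    have hw3' : ∀ y, c ≤ y → y < c' → y ∈ s := fun y hy1 hy2 =>
      Std.HashSet.contains_iff_mem.mp (hw3 y hy1 hy2)
    have hkey : c' = pvNf a b := by
      refine pvLeast_unique (fun y => y ∉ s) c c' (pvNf a b) hw1 hw2'
        (fun y hy1 hy2 => not_not_intro (hw3' y hy1 hy2)) (by omega) ?_ ?_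
      · show pvNf a b ∉ s
        rw [hmem]
        rintro (h | ⟨_, h2⟩)
        · exact hn2 h
        · omega
      · intro y hy1 hy2
        show ¬ y ∉ s
        rw [not_not, hmem]
        by_cases hyb : y < b
        · exact Or.inr ⟨by omega, hyb⟩
        · exact Or.inl (hn3 y (by omega) hy2)
    have hstep : pvIterA (k + 1) (m, s, c) = pvIterA k (m + c', s.insert c', c') := rfl
    rw [hstep, ih (m + c') (s.insert c') c' (c' + 1) (by omega) (by omega) ?_]
    · simp [pvSpecSum, hkey]; ring
    · intro x
      simp only [Std.HashSet.mem_insert, beq_iff_eq, hmem]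
      constructor
      · rintro (rfl | (hx | ⟨hx1, hx2⟩))
        · exact Or.inr ⟨by omega, by omega⟩
        · exact Or.inl hx
        · exact Or.inr ⟨hx1, by omega⟩
      · rintro (hx | ⟨hx1, hx2⟩)
        · exact Or.inr (Or.inl hx)
        · by_cases hxb : x < b
          · exact Or.inr (Or.inr ⟨hx1, hxb⟩)
          · by_cases hxc : x = c'
            · exact Or.inl hxc.symm
            · exact Or.inr (Or.inl (hn3 x (by omega) (by omega)))

lemma pvCaseA_spec (n : Int) (a : List Int) : pvCaseA n a = pvSpecSum a n.toNat 0 := by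
  unfold pvCaseA
  rw [pvFoldl_stepA]
  have hlen : (PySem.List.pyRange 0 n 1).length = n.toNat := by
    simp [PySem.List.pyRange_one]
  rw [hlen, pvIterA_spec a n.toNat 0 (Std.HashSet.ofList a) 0 0 (le_refl 0) (le_refl 0) ?_]
  · ring
  · intro x
    rw [show (x ∈ Std.HashSet.ofList a) ↔ x ∈ a by simp [Std.HashSet.mem_ofList]]
    constructor
    · exact Or.inl
    · rintro (h | ⟨h1, h2⟩)
      · exact h
      · omega

-- ---- B side ----

lemma pvGapsB_spec (a : List Int) : ∀ (vals : List Int) (rem total cur : Int),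
    0 ≤ cur →
    vals.Pairwise (· < ·) →
    (∀ v ∈ vals, cur ≤ v) →
    (∀ y : Int, cur ≤ y → (y ∈ a ↔ y ∈ vals)) →
    pvFinishB (pvGapsB vals rem total cur) = total + pvSpecSum a rem.toNat cur := by
  intro vals
  induction vals with
  | nil =>
    intro rem total cur hcur _ _ hmem
    by_cases hrem : rem ≤ 0
    · have h0 : rem.toNat = 0 := by omega
      simp [pvGapsB, pvFinishB, h0, pvSpecSum, if_neg (by omega : ¬ rem > 0)]
    · have hfree : ∀ y, cur ≤ y → y < cur + (rem.toNat : Int) → y ∉ a := by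
        intro y hy _ hya
        simpa using (hmem y hy).mp hya
      have hrun := pvSpecSum_run a rem.toNat rem.toNat cur (le_refl _) hfree
      simp only [Nat.sub_self] at hrun
      have hcast : ((rem.toNat : Nat) : Int) = rem := by omega
      rw [show pvGapsB [] rem total cur = (rem, total, cur) from rfl]
      simp only [pvFinishB, if_pos (by omega : rem > 0), hrun, pvSpecSum,
        pvFd_tri rem (by omega), hcast]
      ring
  | cons v vs ih =>
    intro rem total cur hcur hpw hlb hmem
    have hv : cur ≤ v := hlb v (by simp)
    have hvs_lt : ∀ w ∈ vs, v < w := (List.pairwise_cons.mp hpw).1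
    have hpw' := (List.pairwise_cons.mp hpw).2
    by_cases hrem : rem ≤ 0
    · have h0 : rem.toNat = 0 := by
        omega
      rw [show pvGapsB (v :: vs) rem total cur = (rem, total, cur) by
        simp only [pvGapsB, if_pos hrem]]
      simp [pvFinishB, if_neg (by omega : ¬ rem > 0), h0, pvSpecSum]
    · have hva : v ∈ a := (hmem v hv).mpr (by simp)
      have hmem' : ∀ y : Int, v + 1 ≤ y → (y ∈ a ↔ y ∈ vs) := by
        intro y hy
        rw [hmem y (by omega)]
        simp only [List.mem_cons]
        constructor
        · rintro (rfl | h)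
          · omega
          · exact h
        · exact Or.inr
      have hlb' : ∀ w ∈ vs, v + 1 ≤ w := fun w hw => by have := hvs_lt w hw; omega
      by_cases hgap : v - cur > 0
      · set take := min rem (v - cur) with htake
        have ht1 : 0 < take := by omega
        have ht2 : take ≤ rem := min_le_left _ _
        have ht3 : take ≤ v - cur := min_le_right _ _
        have hfree : ∀ y, cur ≤ y → y < cur + (take.toNat : Int) → y ∉ a := by
          intro y hy1 hy2 hya
          have h5 : y ∈ v :: vs := (hmem y hy1).mp hya
          have h6 : y < v := by omega
          rcases List.mem_cons.mp h5 with rfl | h7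
          · omega
          · have := hvs_lt y h7; omega
        have hrun := pvSpecSum_run a take.toNat rem.toNat cur (by omega) hfree
        have hstep : pvGapsB (v :: vs) rem total cur
            = pvGapsB vs (rem - take)
                (total + take * cur + PySem.Int.floordiv (take * (take - 1)) 2) (v + 1) := by
          simp only [pvGapsB, if_neg hrem, if_pos hgap]
          rw [← htake]
        rw [hstep, ih (rem - take) _ (v + 1) (by omega) hpw' hlb' hmem', hrun,
          pvFd_tri take (by omega)]
        have hnt : (rem - take).toNat = rem.toNat - take.toNat := by omega
        have hcast : ((take.toNat : Nat) : Int) = take := by omega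
        by_cases hle : v - cur ≤ rem
        · have harg : cur + ((take.toNat : Nat) : Int) = v := by omega
          rw [harg, pvSpecSum_mem_step a _ v hva, hnt, hcast]
          ring
        · have h0' : rem.toNat - take.toNat = 0 := by omega
          have h0'' : (rem - take).toNat = 0 := by omega
          simp only [h0', h0'', pvSpecSum, hcast]
          ring
      · have hvc : v = cur := by omega
        subst hvc
        have hstep : pvGapsB (v :: vs) rem total v = pvGapsB vs rem total (v + 1) := by
          simp only [pvGapsB, if_neg hrem, if_neg hgap]
        rw [hstep, ih rem total (v + 1) (by omega) hpw' hlb' hmem',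
          pvSpecSum_mem_step a rem.toNat v hva]

lemma pvCaseB_spec (n : Int) (a : List Int) : pvCaseB n a = pvSpecSum a n.toNat 0 := by
  unfold pvCaseB
  have hmemv : ∀ y : Int,
      y ∈ PySem.List.sorted (PySem.Set.ofList (a.filter (fun x => decide (0 ≤ x)))) (fun x => x) false
        ↔ (y ∈ a ∧ 0 ≤ y) := by
    intro y
    rw [PySem.List.mem_sorted, PySem.Set.mem_ofList, List.mem_filter]
    simp
  rw [pvGapsB_spec a _ n 0 0 (le_refl 0) (PySem.List.sorted_ofList_pairwise_lt _)
      (fun v hv => ((hmemv v).mp hv).2) ?_]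
  · ring
  · intro y hy
    rw [hmemv y]
    exact ⟨fun h => ⟨h, hy⟩, fun h => h.1⟩

-- ===== VERDICT (by name: the statement is the Claim_ definition above) =====
theorem minimum_m_values_spec : Claim_equal_minimum_m_values := by
  intro tcs _
  unfold Spec_minimum_m_values
  unfold minimum_m_values minimum_m_values_alt
  rw [PySem.List.foldl_append_singleton_eq_map, PySem.List.foldl_append_singleton_eq_map]
  simp only [List.nil_append]
  exact List.map_congr_left (fun p _ => by rw [pvCaseA_spec, pvCaseB_spec])
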